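-- pv_equiv track=rewrite | github.com/vamgan/Leetcode | 325-maximum-size-subarray-sum-equals-k/325-maximum-size-subarray-sum-equals-k.py | maxSubArrayLen
-- ===== SOURCE A (Python) =====
-- from typing import List
--
-- def maxSubArrayLen(nums: List[int], k: int) -> int:
--     mapper = {}
--     running_sum = 0
--     max_length = 0
--     for i,n in enumerate(nums):
--         running_sum += n
--         if running_sum == k:
--             max_length = i + 1
--         if running_sum - k in mapper:
--             max_length = max(max_length, i - mapper[running_sum - k])
--         if running_sum not in mapper:
--             mapper[running_sum] = i
--     return max_length
-- ===== SOURCE B (Python) =====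
-- from typing import List
--
-- def maxSubArrayLen(nums: List[int], k: int) -> int:
--     # Brute-force nested scan: for every start position, extend a running sum
--     # to the right and record the longest window that hits k. No hashmap.
--     best = 0
--     tail = nums
--     while tail:
--         s = 0
--         length = 0
--         for x in tail:
--             s += x
--             length += 1
--             if s == k and length > best:
--                 best = length
--         tail = tail[1:]
--     return best
-- ===== Notes on version B (the rewrite author's own statement) =====
-- stated objective: alternative
-- what changed: Replaced the single-pass prefix-sum hashmap with a naive nested scan over every start position, keeping only a running sum and the best length (no dictionary).
import Mathlib
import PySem

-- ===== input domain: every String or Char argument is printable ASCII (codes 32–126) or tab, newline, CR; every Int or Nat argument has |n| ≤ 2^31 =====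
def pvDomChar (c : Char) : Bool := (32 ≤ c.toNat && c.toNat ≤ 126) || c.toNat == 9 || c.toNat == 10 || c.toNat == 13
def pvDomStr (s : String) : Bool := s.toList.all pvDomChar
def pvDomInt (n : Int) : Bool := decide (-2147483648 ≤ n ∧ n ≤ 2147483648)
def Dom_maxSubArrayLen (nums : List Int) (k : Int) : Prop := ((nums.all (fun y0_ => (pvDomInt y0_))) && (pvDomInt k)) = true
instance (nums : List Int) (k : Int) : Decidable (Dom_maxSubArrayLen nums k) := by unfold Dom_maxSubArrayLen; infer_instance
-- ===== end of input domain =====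

-- B replaces A's single-pass prefix-sum hashmap by a plain nested scan over all
-- start positions (no dictionary); same return value, proved equal on all inputs.

-- ===== PORT A =====
-- A's for-loop as structural recursion over the same state (i, mapper, running_sum, max_length)
def pvLoopA (k : Int) : List Int → Int → PySem.Dict Int Int → Int → Int → Int
  | [], _, _, _, ml => ml
  | n :: rest, i, mapper, rs, ml =>
    let rs' := rs + n
    let ml1 := if rs' = k then i + 1 else ml
    let ml2 := match mapper.get? (rs' - k) with
      | some j => max ml1 (i - j)
      | none => ml1
    let mapper' := if (mapper.get? rs').isSome then mapper else mapper.insert rs' i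
    pvLoopA k rest (i + 1) mapper' rs' ml2

def maxSubArrayLen (nums : List Int) (k : Int) : Int :=
  pvLoopA k nums 0 PySem.Dict.empty 0 0

-- ===== PORT B =====
-- inner for-loop of B: running sum / length over the current tail
def pvInner (k : Int) : List Int → Int → Int → Int → Int
  | [], _, _, best => best
  | x :: xs, s, len, best =>
    let s' := s + x
    let len' := len + 1
    pvInner k xs s' len' (if s' = k ∧ len' > best then len' else best)

-- outer while-loop of B: one inner scan per tail
def pvOuter (k : Int) : List Int → Int → Int
  | [], best => best
  | x :: xs, best => pvOuter k xs (pvInner k (x :: xs) 0 0 best)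

def maxSubArrayLen_alt (nums : List Int) (k : Int) : Int :=
  pvOuter k nums 0

-- ===== PRECONDITION & SPEC =====
def Spec_maxSubArrayLen (nums : List Int) (k : Int) (out : Int) : Prop := out = maxSubArrayLen_alt nums k
instance (nums : List Int) (k : Int) (out : Int) : Decidable (Spec_maxSubArrayLen nums k out) := by unfold Spec_maxSubArrayLen; infer_instance

-- ===== CLAIM (what is proved, stated in full; the proofs are below) =====
def Claim_equal_maxSubArrayLen : Prop := ∀ (nums : List Int) (k : Int), Dom_maxSubArrayLen nums k → Spec_maxSubArrayLen nums k (maxSubArrayLen nums k)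

-- ===== LEMMAS AND PROOFS =====

-- prefix sum: sum of the first t elements
def pre (nums : List Int) (t : ℕ) : Int := (nums.take t).sum

theorem pre_append_le (p q : List Int) (t : ℕ) (h : t ≤ p.length) : pre (p ++ q) t = pre p t := by
  simp [pre, List.take_append_of_le_length h]

theorem pre_append_add (p q : List Int) (m : ℕ) : pre (p ++ q) (p.length + m) = p.sum + pre q m := by
  simp [pre, List.take_append, List.take_of_length_le (le_add_right (le_refl p.length))]

theorem pre_cons (x : Int) (xs : List Int) (m : ℕ) : pre (x :: xs) (m + 1) = x + pre xs m := by
  simp [pre]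

theorem pre_length (p : List Int) : pre p p.length = p.sum := by simp [pre]

theorem pre_zero (p : List Int) : pre p 0 = 0 := rfl

theorem pre_last (p : List Int) (x : Int) : pre (p ++ [x]) (p.length + 1) = p.sum + x := by
  simp [pre, List.take_append, List.take_of_length_le (le_add_right (le_refl p.length))]

-- the set of index pairs (a, b), a ≤ b ≤ n, whose segment nums[a:b] sums to k
def Gset (nums : List Int) (k : Int) : Finset (ℕ × ℕ) :=
  (Finset.range (nums.length + 1) ×ˢ Finset.range (nums.length + 1)).filter
    (fun p => p.1 ≤ p.2 ∧ pre nums p.2 - pre nums p.1 = k)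

-- the common specification: length of the longest segment summing to k (0 if none)
def Sspec (nums : List Int) (k : Int) : ℕ := (Gset nums k).sup (fun p => p.2 - p.1)

theorem Gmem (nums : List Int) (k : Int) (a b : ℕ) :
    (a, b) ∈ Gset nums k ↔ a ≤ b ∧ b ≤ nums.length ∧ pre nums b - pre nums a = k := by
  simp only [Gset, Finset.mem_filter, Finset.mem_product, Finset.mem_range]
  constructor
  · rintro ⟨⟨_, _⟩, h1, h2⟩; exact ⟨h1, by omega, h2⟩
  · rintro ⟨h1, h2, h3⟩; exact ⟨⟨by omega, by omega⟩, h1, h3⟩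

theorem Sspec_le (nums : List Int) (k : Int) (c : ℕ)
    (h : ∀ a b : ℕ, a ≤ b → b ≤ nums.length → pre nums b - pre nums a = k → b - a ≤ c) :
    Sspec nums k ≤ c := by
  apply Finset.sup_le
  rintro ⟨a, b⟩ hm
  rw [Gmem] at hm
  exact h a b hm.1 hm.2.1 hm.2.2

theorem le_Sspec (nums : List Int) (k : Int) (a b : ℕ) (h1 : a ≤ b) (h2 : b ≤ nums.length)
    (h3 : pre nums b - pre nums a = k) : b - a ≤ Sspec nums k :=
  Finset.le_sup (f := fun q : ℕ × ℕ => q.2 - q.1) ((Gmem nums k a b).2 ⟨h1, h2, h3⟩)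

theorem Sspec_nil (k : Int) : Sspec [] k = 0 := by
  apply Nat.le_antisymm _ (Nat.zero_le _)
  apply Sspec_le
  intro a b _ h2 _
  simp at h2; omega

theorem Sspec_le_length (nums : List Int) (k : Int) : Sspec nums k ≤ nums.length := by
  apply Sspec_le; intro a b _ h2 _; omega

theorem Sspec_mono_append (p : List Int) (x k : Int) : Sspec p k ≤ Sspec (p ++ [x]) k := by
  apply Sspec_le
  intro a b h1 h2 h3
  apply le_Sspec _ _ _ _ h1 (by simp; omega)
  rw [pre_append_le p [x] b h2, pre_append_le p [x] a (by omega)]; exact h3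

-- first t with lo ≤ t ≤ p.length and pre p t = s (A's mapper stores t - 1)
def firstFrom (p : List Int) (s : Int) (lo : ℕ) : Option ℕ :=
  if _h : lo ≤ p.length then
    (if pre p lo = s then some lo else firstFrom p s (lo + 1))
  else none
termination_by p.length + 1 - lo

theorem firstFrom_some (p : List Int) (s : Int) (lo u : ℕ) (h : firstFrom p s lo = some u) :
    lo ≤ u ∧ u ≤ p.length ∧ pre p u = s := by
  fun_induction firstFrom p s lo with
  | case1 lo hlo hc => simp only [Option.some.injEq] at h; subst h; exact ⟨le_refl _, hlo, hc⟩
  | case2 lo hlo hc ih => have := ih h; exact ⟨by omega, this.2⟩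
  | case3 lo hlo => simp at h

theorem firstFrom_min (p : List Int) (s : Int) (lo u : ℕ) (h : firstFrom p s lo = some u)
    (v : ℕ) (hv1 : lo ≤ v) (hv3 : pre p v = s) : u ≤ v := by
  fun_induction firstFrom p s lo with
  | case1 lo hlo hc => simp only [Option.some.injEq] at h; omega
  | case2 lo hlo hc ih =>
      rcases Nat.eq_or_lt_of_le hv1 with heq | hlt
      · exact absurd (heq ▸ hv3) hc
      · exact ih h hlt
  | case3 lo hlo => simp at h

theorem firstFrom_none (p : List Int) (s : Int) (lo : ℕ) (h : firstFrom p s lo = none)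
    (v : ℕ) (hv1 : lo ≤ v) (hv2 : v ≤ p.length) : pre p v ≠ s := by
  fun_induction firstFrom p s lo with
  | case1 lo hlo hc => simp at h
  | case2 lo hlo hc ih =>
      rcases Nat.eq_or_lt_of_le hv1 with heq | hlt
      · exact heq ▸ hc
      · exact ih h hlt
  | case3 lo hlo => omega

theorem firstFrom_append (p : List Int) (x s : Int) (lo : ℕ) (hlo : lo ≤ p.length + 1) :
    firstFrom (p ++ [x]) s lo =
      (firstFrom p s lo).or (if p.sum + x = s then some (p.length + 1) else none) := by
  fun_induction firstFrom (p ++ [x]) s lo with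
  | case1 lo hlo' hc =>
      rcases Nat.lt_or_ge lo (p.length + 1) with hlt | hge
      · have hle : lo ≤ p.length := by omega
        rw [pre_append_le _ _ _ hle] at hc
        have hl : firstFrom p s lo = some lo := by
          rw [firstFrom, dif_pos hle, if_pos hc]
        rw [hl]; rfl
      · have hlo_eq : lo = p.length + 1 := by omega
        subst hlo_eq
        have hl : firstFrom p s (p.length + 1) = none := by
          rw [firstFrom]; exact dif_neg (by omega)
        rw [pre_last] at hc
        rw [hl, if_pos hc]; rfl
  | case2 lo hlo' hc ih =>
      simp only [List.length_append, List.length_cons, List.length_nil] at hlo'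
      rcases Nat.lt_or_ge lo (p.length + 1) with hlt | hge
      · have hle : lo ≤ p.length := by omega
        rw [pre_append_le _ _ _ hle] at hc
        have hl : firstFrom p s lo = firstFrom p s (lo + 1) := by
          rw [firstFrom, dif_pos hle, if_neg hc]
        rw [ih (by omega), hl]
      · have hlo_eq : lo = p.length + 1 := by omega
        subst hlo_eq
        rw [pre_last] at hc
        have hl1 : firstFrom (p ++ [x]) s (p.length + 1 + 1) = none := by
          rw [firstFrom]; exact dif_neg (by simp)
        have hl2 : firstFrom p s (p.length + 1) = none := by
          rw [firstFrom]; exact dif_neg (by omega)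
        rw [hl1, hl2, if_neg hc]; rfl
  | case3 lo hlo' => simp at hlo'; omega

-- longest segment ending at the right edge of p ++ [x] (as computed by A's two branches)
def endB (p : List Int) (x k : Int) : ℕ :=
  max (if p.sum + x = k then p.length + 1 else 0)
      ((firstFrom p (p.sum + x - k) 1).elim 0 (fun t => p.length + 1 - t))

theorem Sspec_append_singleton (p : List Int) (x k : Int) :
    Sspec (p ++ [x]) k = max (Sspec p k) (endB p x k) := by
  apply Nat.le_antisymm
  · apply Sspec_le
    intro a b h1 h2 h3
    simp only [List.length_append, List.length_cons, List.length_nil] at h2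
    rcases Nat.lt_or_ge b (p.length + 1) with hb | hb
    · have hbp : b ≤ p.length := by omega
      have := le_Sspec p k a b h1 hbp
        (by rw [← pre_append_le p [x] b hbp, ← pre_append_le p [x] a (by omega)]; exact h3)
      exact le_trans this (le_max_left _ _)
    · have hb' : b = p.length + 1 := by omega
      subst hb'
      rw [pre_last] at h3
      rcases Nat.eq_zero_or_pos a with ha | ha
      · subst ha
        rw [pre_zero] at h3
        refine le_trans ?_ (le_max_right _ _)
        unfold endB
        rw [if_pos (by omega)]
        exact le_trans (by omega) (le_max_left _ _)
      · rcases Nat.lt_or_ge a (p.length + 1) with ha2 | ha2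
        · have hap : a ≤ p.length := by omega
          have hpa : pre p a = p.sum + x - k := by
            rw [← pre_append_le p [x] a hap]; omega
          refine le_trans ?_ (le_max_right _ _)
          unfold endB
          cases hf : firstFrom p (p.sum + x - k) 1 with
          | none => exact absurd hpa (firstFrom_none p _ 1 hf a ha hap)
          | some t =>
              have := firstFrom_min p _ 1 t hf a ha hpa
              simp only [Option.elim_some]
              exact le_trans (by omega) (le_max_right _ _)
        · omega
  · apply max_le (Sspec_mono_append p x k)
    apply max_le
    · split_ifs with hx
      · have := le_Sspec (p ++ [x]) k 0 (p.length + 1) (by omega) (by simp)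
          (by rw [pre_last, pre_zero]; omega)
        omega
      · exact Nat.zero_le _
    · cases hf : firstFrom p (p.sum + x - k) 1 with
      | none => exact Nat.zero_le _
      | some t =>
          obtain ⟨ht1, ht2, ht3⟩ := firstFrom_some p _ 1 t hf
          have := le_Sspec (p ++ [x]) k t (p.length + 1) (by omega) (by simp)
            (by rw [pre_last, pre_append_le p [x] t ht2]; omega)
          simp only [Option.elim_some]
          omega

-- A's mapper invariant is preserved by one loop step
theorem mapper_step (p : List Int) (x : Int) (mapper : PySem.Dict Int Int)
    (inv : ∀ s : Int, mapper.get? s = (firstFrom p s 1).map (fun t : ℕ => (t : Int) - 1)) :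
    ∀ s : Int,
      (if (mapper.get? (p.sum + x)).isSome then mapper
       else mapper.insert (p.sum + x) (p.length : Int)).get? s
        = (firstFrom (p ++ [x]) s 1).map (fun t : ℕ => (t : Int) - 1) := by
  intro s
  rw [firstFrom_append p x s 1 (by omega)]
  cases hrs : firstFrom p (p.sum + x) 1 with
  | some t =>
      rw [if_pos (by rw [inv, hrs]; rfl)]
      cases hs : firstFrom p s 1 with
      | some u => rw [inv, hs]; rfl
      | none =>
          rw [inv, hs]
          by_cases hse : p.sum + x = s
          · rw [hse] at hrs; rw [hrs] at hs; exact absurd hs (by simp)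
          · rw [if_neg hse]; rfl
  | none =>
      rw [if_neg (by rw [inv, hrs]; simp)]
      rw [PySem.Dict.get?_insert]
      by_cases hse : s = p.sum + x
      · subst hse
        rw [if_pos rfl, hrs, if_pos rfl]
        simp
      · rw [if_neg hse, inv, if_neg (fun h => hse h.symm)]
        cases firstFrom p s 1 <;> rfl

-- one step of A's loop body computes Sspec (p ++ [x]) k
theorem ml_step (p : List Int) (x k : Int) (mapper : PySem.Dict Int Int)
    (inv : ∀ s : Int, mapper.get? s = (firstFrom p s 1).map (fun t : ℕ => (t : Int) - 1)) :
    (match mapper.get? (p.sum + x - k) with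
     | some j => max (if p.sum + x = k then (p.length : Int) + 1 else ((Sspec p k : ℕ) : Int)) ((p.length : Int) - j)
     | none => (if p.sum + x = k then (p.length : Int) + 1 else ((Sspec p k : ℕ) : Int)))
      = ((Sspec (p ++ [x]) k : ℕ) : Int) := by
  have hle : Sspec p k ≤ p.length := Sspec_le_length p k
  rw [Sspec_append_singleton, inv]
  cases hf : firstFrom p (p.sum + x - k) 1 with
  | none =>
      simp only [Option.map_none]
      unfold endB
      rw [hf]
      simp only [Option.elim_none]
      split_ifs with hx
      · have h1 : max (Sspec p k) (max (p.length + 1) 0) = p.length + 1 := by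
          simp only [max_def]; split_ifs <;> omega
        rw [h1]; push_cast [Int.add_comm]; ring_nf
      · simp
  | some t =>
      obtain ⟨ht1, ht2, _⟩ := firstFrom_some p _ 1 t hf
      simp only [Option.map_some]
      unfold endB
      rw [hf]
      simp only [Option.elim_some]
      split_ifs with hx
      · have h1 : max (Sspec p k) (max (p.length + 1) (p.length + 1 - t)) = p.length + 1 := by
          simp only [max_def]; split_ifs <;> omega
        rw [h1]
        have h2 : max ((p.length : Int) + 1) ((p.length : Int) - ((t : Int) - 1)) = (p.length : Int) + 1 := by
          simp only [max_def]; split_ifs <;> omega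
        rw [h2]; push_cast; ring
      · have h1 : max (Sspec p k) (max 0 (p.length + 1 - t)) = max (Sspec p k) (p.length + 1 - t) := by
          simp
        rw [h1]
        rcases Nat.le_total (Sspec p k) (p.length + 1 - t) with hc | hc
        · rw [max_eq_right hc, max_eq_right (by omega)]
          push_cast [Nat.cast_sub (show t ≤ p.length + 1 by omega)]; ring
        · rw [max_eq_left hc, max_eq_left (by omega)]

-- the main loop lemma for A
theorem loopA (k : Int) : ∀ (xs p : List Int) (mapper : PySem.Dict Int Int),
    (∀ s : Int, mapper.get? s = (firstFrom p s 1).map (fun t : ℕ => (t : Int) - 1)) →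
    pvLoopA k xs (p.length : Int) mapper p.sum ((Sspec p k : ℕ) : Int)
      = ((Sspec (p ++ xs) k : ℕ) : Int) := by
  intro xs
  induction xs with
  | nil => intro p mapper _; simp [pvLoopA]
  | cons x rest ih =>
      intro p mapper inv
      have unfold1 : pvLoopA k (x :: rest) (p.length : Int) mapper p.sum ((Sspec p k : ℕ) : Int) =
          pvLoopA k rest ((p.length : Int) + 1)
            (if (mapper.get? (p.sum + x)).isSome then mapper
             else mapper.insert (p.sum + x) (p.length : Int))
            (p.sum + x)
            (match mapper.get? (p.sum + x - k) with
             | some j => max (if p.sum + x = k then (p.length : Int) + 1 else ((Sspec p k : ℕ) : Int)) ((p.length : Int) - j)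
             | none => (if p.sum + x = k then (p.length : Int) + 1 else ((Sspec p k : ℕ) : Int))) := rfl
      rw [unfold1, ml_step p x k mapper inv]
      have hmap := mapper_step p x mapper inv
      have h2 : (p.length : Int) + 1 = ((p ++ [x]).length : Int) := by simp
      have h3 : p.sum + x = (p ++ [x]).sum := by simp
      rw [h2, h3]
      rw [h3] at hmap
      have := ih (p ++ [x])
        (if (mapper.get? ((p ++ [x]).sum)).isSome then mapper
         else mapper.insert ((p ++ [x]).sum) (p.length : Int)) hmap
      rw [show (p ++ [x]) ++ rest = p ++ x :: rest from by simp] at this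
      exact this

theorem mainA (nums : List Int) (k : Int) : maxSubArrayLen nums k = ((Sspec nums k : ℕ) : Int) := by
  have inv : ∀ s : Int, (PySem.Dict.empty : PySem.Dict Int Int).get? s
      = (firstFrom [] s 1).map (fun t : ℕ => (t : Int) - 1) := by
    intro s
    rw [firstFrom, dif_neg (by simp)]
    simp [PySem.Dict.empty, PySem.Dict.get?]
  have := loopA k nums [] PySem.Dict.empty inv
  simp only [List.length_nil, List.sum_nil, Sspec_nil, List.nil_append, Nat.cast_zero] at this
  unfold maxSubArrayLen
  exact this

-- ===== B side =====

-- best window starting at the current tail, inner state (s, len)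
def colB (k s : Int) (xs : List Int) (len : ℕ) : ℕ :=
  ((Finset.range xs.length).filter (fun t => s + pre xs (t + 1) = k)).sup (fun t => len + t + 1)

theorem colB_le (k s : Int) (xs : List Int) (len c : ℕ)
    (h : ∀ t : ℕ, t < xs.length → s + pre xs (t + 1) = k → len + t + 1 ≤ c) :
    colB k s xs len ≤ c := by
  apply Finset.sup_le
  intro t ht
  simp only [Finset.mem_filter, Finset.mem_range] at ht
  exact h t ht.1 ht.2

theorem le_colB (k s : Int) (xs : List Int) (len t : ℕ) (ht : t < xs.length)
    (hc : s + pre xs (t + 1) = k) : len + t + 1 ≤ colB k s xs len :=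
  Finset.le_sup (f := fun t => len + t + 1)
    (by simp only [Finset.mem_filter, Finset.mem_range]; exact ⟨ht, hc⟩)

theorem colB_nil (k s : Int) (len : ℕ) : colB k s [] len = 0 := by
  simp [colB]

theorem colB_cons (k s x : Int) (xs : List Int) (len : ℕ) :
    colB k s (x :: xs) len = max (if s + x = k then len + 1 else 0) (colB k (s + x) xs (len + 1)) := by
  apply Nat.le_antisymm
  · apply colB_le
    intro t ht hc
    cases t with
    | zero =>
        rw [pre_cons, pre_zero] at hc
        rw [if_pos (by omega)]
        exact le_trans (by omega) (le_max_left _ _)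
    | succ u =>
        rw [pre_cons] at hc
        refine le_trans ?_ (le_max_right _ _)
        have := le_colB k (s + x) xs (len + 1) u (by simpa using ht) (by omega)
        omega
  · apply max_le
    · split_ifs with hx
      · have := le_colB k s (x :: xs) len 0 (by simp) (by rw [pre_cons, pre_zero]; omega)
        omega
      · exact Nat.zero_le _
    · apply colB_le
      intro u hu hc
      have := le_colB k s (x :: xs) len (u + 1) (by simpa using hu) (by rw [pre_cons]; omega)
      omega

theorem inner_eq (k : Int) : ∀ (xs : List Int) (s best : Int) (len : ℕ), 0 ≤ best →
    pvInner k xs s (len : Int) best = max best ((colB k s xs len : ℕ) : Int) := by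
  intro xs
  induction xs with
  | nil =>
      intro s best len hb
      rw [pvInner, colB_nil]
      simp only [Nat.cast_zero]
      omega
  | cons x xs ih =>
      intro s best len hb
      have unfold1 : pvInner k (x :: xs) s (len : Int) best =
          pvInner k xs (s + x) ((len : Int) + 1)
            (if s + x = k ∧ (len : Int) + 1 > best then (len : Int) + 1 else best) := rfl
      rw [unfold1]
      have hcast : (len : Int) + 1 = ((len + 1 : ℕ) : Int) := by push_cast; ring
      rw [hcast]
      rw [ih (s + x) _ (len + 1) (by split_ifs <;> omega)]
      rw [colB_cons]
      push_cast
      by_cases hx : s + x = k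
      · simp only [hx, true_and]
        simp only [max_def]
        split_ifs <;> omega
      · simp only [hx, false_and, if_false]
        simp only [max_def]
        split_ifs <;> omega

-- restriction of the spec to pairs starting before i (B's outer invariant)
def Spart (nums : List Int) (k : Int) (i : ℕ) : ℕ :=
  ((Gset nums k).filter (fun pr => pr.1 < i)).sup (fun p => p.2 - p.1)

theorem Spart_le (nums : List Int) (k : Int) (i c : ℕ)
    (h : ∀ a b : ℕ, a ≤ b → b ≤ nums.length → pre nums b - pre nums a = k → a < i → b - a ≤ c) :
    Spart nums k i ≤ c := by
  apply Finset.sup_le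
  rintro ⟨a, b⟩ hm
  simp only [Finset.mem_filter] at hm
  rw [Gmem] at hm
  exact h a b hm.1.1 hm.1.2.1 hm.1.2.2 hm.2

theorem le_Spart (nums : List Int) (k : Int) (i a b : ℕ) (h1 : a ≤ b) (h2 : b ≤ nums.length)
    (h3 : pre nums b - pre nums a = k) (h4 : a < i) : b - a ≤ Spart nums k i := by
  have hm : ((a, b) : ℕ × ℕ) ∈ (Gset nums k).filter (fun pr => pr.1 < i) := by
    simp only [Finset.mem_filter]
    exact ⟨(Gmem nums k a b).2 ⟨h1, h2, h3⟩, h4⟩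
  exact Finset.le_sup (f := fun q : ℕ × ℕ => q.2 - q.1) hm

theorem Spart_zero (nums : List Int) (k : Int) : Spart nums k 0 = 0 := by
  apply Nat.le_antisymm _ (Nat.zero_le _)
  apply Spart_le
  intro a b _ _ _ h4
  omega

theorem Spart_full (nums : List Int) (k : Int) : Spart nums k nums.length = Sspec nums k := by
  apply Nat.le_antisymm
  · apply Spart_le
    intro a b h1 h2 h3 _
    exact le_Sspec nums k a b h1 h2 h3
  · apply Sspec_le
    intro a b h1 h2 h3
    rcases Nat.lt_or_ge a nums.length with ha | ha
    · exact le_Spart nums k nums.length a b h1 h2 h3 ha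
    · omega

theorem Spart_succ (p : List Int) (xs : List Int) (k : Int) :
    Spart (p ++ xs) k (p.length + 1) = max (Spart (p ++ xs) k p.length) (colB k 0 xs 0) := by
  have hpre_i : pre (p ++ xs) p.length = p.sum := by
    rw [pre_append_le p xs p.length (le_refl _), pre_length]
  apply Nat.le_antisymm
  · apply Spart_le
    intro a b h1 h2 h3 h4
    rcases Nat.lt_or_ge a p.length with ha | ha
    · exact le_trans (le_Spart _ _ _ a b h1 h2 h3 ha) (le_max_left _ _)
    · have ha' : a = p.length := by omega
      subst ha'
      rcases Nat.eq_or_lt_of_le h1 with hb | hb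
      · omega
      · have hu : b = p.length + ((b - p.length - 1) + 1) := by omega
        refine le_trans ?_ (le_max_right _ _)
        set u := b - p.length - 1 with hudef
        have hblen : b ≤ p.length + xs.length := by simpa using h2
        have hcond : 0 + pre xs (u + 1) = k := by
          rw [hu] at h3
          rw [pre_append_add] at h3
          omega
        have := le_colB k 0 xs 0 u (by omega) hcond
        omega
  · apply max_le
    · apply Spart_le
      intro a b h1 h2 h3 h4
      exact le_Spart _ _ _ a b h1 h2 h3 (by omega)
    · apply colB_le
      intro t ht hc
      have hb : pre (p ++ xs) (p.length + (t + 1)) - pre (p ++ xs) p.length = k := by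
        rw [pre_append_add, hpre_i]
        omega
      have := le_Spart (p ++ xs) k (p.length + 1) p.length (p.length + (t + 1))
        (by omega) (by simp; omega) hb (by omega)
      omega

theorem outer_eq (k : Int) : ∀ (xs p : List Int),
    pvOuter k xs ((Spart (p ++ xs) k p.length : ℕ) : Int) = ((Sspec (p ++ xs) k : ℕ) : Int) := by
  intro xs
  induction xs with
  | nil =>
      intro p
      rw [pvOuter]
      simp [Spart_full]
  | cons x rest ih =>
      intro p
      rw [pvOuter]
      have hin := inner_eq k (x :: rest) 0 ((Spart (p ++ x :: rest) k p.length : ℕ) : Int) 0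
        (Int.natCast_nonneg _)
      norm_num at hin
      rw [hin]
      rw [show max ((Spart (p ++ x :: rest) k p.length : ℕ) : Int) ((colB k 0 (x :: rest) 0 : ℕ) : Int)
            = ((max (Spart (p ++ x :: rest) k p.length) (colB k 0 (x :: rest) 0) : ℕ) : Int) from by
        push_cast; rfl]
      rw [← Spart_succ p (x :: rest) k]
      have := ih (p ++ [x])
      rw [show (p ++ [x]) ++ rest = p ++ x :: rest from by simp] at this
      rw [show (p ++ [x]).length = p.length + 1 from by simp] at this
      exact this

theorem mainB (nums : List Int) (k : Int) : maxSubArrayLen_alt nums k = ((Sspec nums k : ℕ) : Int) := by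
  have := outer_eq k nums []
  simp only [List.nil_append, List.length_nil, Spart_zero, Nat.cast_zero] at this
  unfold maxSubArrayLen_alt
  exact this

-- ===== VERDICT (by name: the statement is the Claim_ definition above) =====
theorem maxSubArrayLen_spec : Claim_equal_maxSubArrayLen := by
  intro nums k _
  unfold Spec_maxSubArrayLen
  rw [mainA, mainB]
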